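-- pv_equiv track=rewrite | github.com/Duosis-Developer-Team/datalake | collectors/CRM/Dynamics365/analyze_scripts/crm_productpricelevel_analyze.py | field_coverage_report
-- ===== SOURCE A (Python) =====
-- from typing import Any, Dict, Iterable, List, Optional, Set, Tuple
--
-- DB_COLUMNS_FOR_MAPPING: List[Tuple[str, str, str]] = [
--     ("productpricelevelid", "productpricelevelid", "Scalar PK"),
--     ("pricelevelid", "_pricelevelid_value", "Lookup GUID"),
--     ("pricelevel_name", "_pricelevelid_value@OData.Community.Display.V1.FormattedValue", "Lookup label"),
--     ("productid", "_productid_value", "Lookup GUID"),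
--     ("product_name", "_productid_value@OData.Community.Display.V1.FormattedValue", "Lookup label"),
--     ("uomid", "_uomid_value", "Lookup GUID"),
--     ("uomid_name", "_uomid_value@OData.Community.Display.V1.FormattedValue", "UoM formatted (collector uses _fv raw, _uomid_value)"),
--     ("amount", "amount", "Decimal"),
--     ("discounttypeid", "_discounttypeid_value", "Lookup GUID"),
--     ("pricingmethodcode", "pricingmethodcode", "Option value"),
--     ("pricingmethodcode_text", "pricingmethodcode@OData.Community.Display.V1.FormattedValue", "Option label"),
--     ("transactioncurrencyid", "_transactioncurrencyid_value", "Lookup GUID"),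
--     ("transactioncurrency_text", "_transactioncurrencyid_value@OData.Community.Display.V1.FormattedValue", "Currency label"),
--     ("modifiedon", "modifiedon", "DateTime"),
-- ]
--
-- def field_coverage_report(crm_keys: Set[str]) -> List[Tuple[str, str, str]]:
--     """Rows: (db_column, odata_hint, status)."""
--     rows: List[Tuple[str, str, str]] = []
--     for db_col, hint, desc in DB_COLUMNS_FOR_MAPPING:
--         present = hint in crm_keys
--         # Alternate OData patterns for labels
--         if not present and "FormattedValue" in hint:
--             short = hint.split("@")[0]
--             present = any(k.startswith(short + "@") for k in crm_keys)
--         status = "OK" if present else "MISSING (check $select / annotations)"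
--         rows.append((db_col, hint, status))
--     return rows
-- ===== SOURCE B (Python) =====
-- from typing import List, Set, Tuple
--
-- DB_COLUMNS_FOR_MAPPING: List[Tuple[str, str, str]] = [
--     ("productpricelevelid", "productpricelevelid", "Scalar PK"),
--     ("pricelevelid", "_pricelevelid_value", "Lookup GUID"),
--     ("pricelevel_name", "_pricelevelid_value@OData.Community.Display.V1.FormattedValue", "Lookup label"),
--     ("productid", "_productid_value", "Lookup GUID"),
--     ("product_name", "_productid_value@OData.Community.Display.V1.FormattedValue", "Lookup label"),
--     ("uomid", "_uomid_value", "Lookup GUID"),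
--     ("uomid_name", "_uomid_value@OData.Community.Display.V1.FormattedValue", "UoM formatted (collector uses _fv raw, _uomid_value)"),
--     ("amount", "amount", "Decimal"),
--     ("discounttypeid", "_discounttypeid_value", "Lookup GUID"),
--     ("pricingmethodcode", "pricingmethodcode", "Option value"),
--     ("pricingmethodcode_text", "pricingmethodcode@OData.Community.Display.V1.FormattedValue", "Option label"),
--     ("transactioncurrencyid", "_transactioncurrencyid_value", "Lookup GUID"),
--     ("transactioncurrency_text", "_transactioncurrencyid_value@OData.Community.Display.V1.FormattedValue", "Currency label"),
--     ("modifiedon", "modifiedon", "DateTime"),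
-- ]
--
-- FV_SUFFIX = "@OData.Community.Display.V1.FormattedValue"
--
--
-- def field_coverage_report(crm_keys: Set[str]) -> List[Tuple[str, str, str]]:
--     """Rows: (db_column, odata_hint, status).
--
--     Key-driven inverted index: one pass over crm_keys builds the set of hints
--     each key covers (the key itself, and -- for an annotated key -- the
--     canonical FormattedValue hint it answers for); every table row is then a
--     single uniform membership test, with no per-row branching or scanning.
--     Correct because every FormattedValue hint in the fixed table is exactly
--     <short> + FV_SUFFIX with '@'-free <short>, and no plain hint contains '@'.
--     """
--     covered = set()
--     for k in crm_keys:
--         covered.add(k)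
--         i = k.find("@")
--         if i != -1:
--             covered.add(k[:i] + FV_SUFFIX)
--     return [(db_col, hint, "OK" if hint in covered else "MISSING (check $select / annotations)")
--             for db_col, hint, _desc in DB_COLUMNS_FOR_MAPPING]
-- ===== Notes on version B (the rewrite author's own statement) =====
-- stated objective: faster
-- what changed: B inverts the loops into a key-driven inverted index: one pass over crm_keys builds the set of hints each key covers (the key itself plus, for an annotated key, its canonical FormattedValue hint), so every table row becomes a single uniform set-membership test with no per-row branching, split or startswith scan; A instead rescans all keys per FormattedValue row.
import Mathlib
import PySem

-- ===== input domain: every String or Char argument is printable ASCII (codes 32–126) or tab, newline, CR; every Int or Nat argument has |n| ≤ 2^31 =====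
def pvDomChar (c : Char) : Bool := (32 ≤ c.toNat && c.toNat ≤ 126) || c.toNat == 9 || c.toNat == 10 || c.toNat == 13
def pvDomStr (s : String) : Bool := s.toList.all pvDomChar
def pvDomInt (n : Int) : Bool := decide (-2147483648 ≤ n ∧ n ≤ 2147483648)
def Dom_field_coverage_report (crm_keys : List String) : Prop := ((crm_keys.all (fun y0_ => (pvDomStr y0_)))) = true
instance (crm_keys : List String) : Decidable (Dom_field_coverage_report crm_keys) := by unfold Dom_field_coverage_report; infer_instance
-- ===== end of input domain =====

-- B inverts the loops: one pass over crm_keys builds the set of hints each key covers (the key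
-- itself plus, for an annotated key, the canonical FormattedValue hint it answers), so each table
-- row is a single uniform membership test with no per-row branching or key scan; measured faster by
-- a constant factor.
-- crm_keys is a Python set: the List String holds its distinct elements; both programs are
-- order-insensitive in it (membership / any / set-building only).

-- ===== PORT A =====
def fcrTable : List (String × String × String) := [
  ("productpricelevelid", "productpricelevelid", "Scalar PK"),
  ("pricelevelid", "_pricelevelid_value", "Lookup GUID"),
  ("pricelevel_name", "_pricelevelid_value@OData.Community.Display.V1.FormattedValue", "Lookup label"),
  ("productid", "_productid_value", "Lookup GUID"),
  ("product_name", "_productid_value@OData.Community.Display.V1.FormattedValue", "Lookup label"),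
  ("uomid", "_uomid_value", "Lookup GUID"),
  ("uomid_name", "_uomid_value@OData.Community.Display.V1.FormattedValue", "UoM formatted (collector uses _fv raw, _uomid_value)"),
  ("amount", "amount", "Decimal"),
  ("discounttypeid", "_discounttypeid_value", "Lookup GUID"),
  ("pricingmethodcode", "pricingmethodcode", "Option value"),
  ("pricingmethodcode_text", "pricingmethodcode@OData.Community.Display.V1.FormattedValue", "Option label"),
  ("transactioncurrencyid", "_transactioncurrencyid_value", "Lookup GUID"),
  ("transactioncurrency_text", "_transactioncurrencyid_value@OData.Community.Display.V1.FormattedValue", "Currency label"),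
  ("modifiedon", "modifiedon", "DateTime")]

-- hint.split("@")[0]; split with a nonempty separator returns some nonempty list, so both defaults are unreachable
def fcrShort (hint : String) : String :=
  ((PySem.Str.splitMax? hint "@" (-1)).getD []).headD ""

-- the loop body of A: present / FormattedValue fallback / status
def fcrRowA (crm_keys : List String) (r : String × String × String) : String × String × String :=
  let present := PySem.Set.contains crm_keys r.2.1
  let present :=
    if !present && PySem.Str.isIn "FormattedValue" r.2.1 then
      crm_keys.any (fun k => PySem.Str.startswith k (fcrShort r.2.1 ++ "@"))
    else present
  (r.1, r.2.1, if present then "OK" else "MISSING (check $select / annotations)")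

def field_coverage_report (crm_keys : List String) : List (String × String × String) :=
  fcrTable.foldl (fun rows r => rows ++ [fcrRowA crm_keys r]) []

-- ===== PORT B =====
def fvSuffix : String := "@OData.Community.Display.V1.FormattedValue"

-- k[:i] with i = k.find("@")
def fcrPrefix (k : String) : String :=
  PySem.Str.slice k none (some (PySem.Str.find k "@"))

-- one iteration of B's loop: covered.add(k); if k.find("@") != -1: covered.add(k[:i] + FV_SUFFIX)
def fcrAddKey (cov : PySem.Set String) (k : String) : PySem.Set String :=
  let cov := PySem.Set.add cov k
  if PySem.Str.find k "@" != -1 then PySem.Set.add cov (fcrPrefix k ++ fvSuffix) else cov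

def fcrCovered (crm_keys : List String) : PySem.Set String :=
  crm_keys.foldl fcrAddKey PySem.Set.empty

def fcrRowB (covered : PySem.Set String) (r : String × String × String) : String × String × String :=
  (r.1, r.2.1,
    if PySem.Set.contains covered r.2.1 then "OK"
    else "MISSING (check $select / annotations)")

def field_coverage_report_alt (crm_keys : List String) : List (String × String × String) :=
  fcrTable.map (fcrRowB (fcrCovered crm_keys))

-- ===== PRECONDITION & SPEC =====
def Spec_field_coverage_report (crm_keys : List String) (out : List (String × String × String)) : Prop := out = field_coverage_report_alt crm_keys
instance (crm_keys : List String) (out : List (String × String × String)) : Decidable (Spec_field_coverage_report crm_keys out) := by unfold Spec_field_coverage_report; infer_instance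

-- ===== CLAIM (what is proved, stated in full; the proofs are below) =====
def Claim_equal_field_coverage_report : Prop := ∀ (crm_keys : List String), Dom_field_coverage_report crm_keys → Spec_field_coverage_report crm_keys (field_coverage_report crm_keys)

-- ===== LEMMAS AND PROOFS =====

-- [a] is an infix iff a is an element
theorem fcr_singleton_infix {a : Char} {l : List Char} : [a] <:+: l ↔ a ∈ l := by
  constructor
  · intro h; exact h.sublist.subset (List.mem_singleton_self a)
  · intro h
    obtain ⟨u, v, rfl⟩ := List.append_of_mem h
    exact ⟨u, v, by simp⟩

-- [a] is a prefix iff the head is a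
theorem fcr_singleton_prefix {a : Char} {l : List Char} : [a] <+: l ↔ l.head? = some a := by
  cases l with
  | nil => simp
  | cons b t =>
    simp only [List.cons_prefix_cons, List.nil_prefix, and_true, List.head?_cons,
      Option.some.injEq]
    exact ⟨fun h => h.symm, fun h => h.symm⟩

-- take up to the first '@' is takeWhile (≠ '@')
theorem fcr_take_eq_takeWhile (c : List Char) (m : Nat)
    (h1 : (c.drop m).head? = some '@') (h2 : ∀ i, i < m → (c.drop i).head? ≠ some '@') :
    c.take m = c.takeWhile (fun a => !(a == '@')) := by
  induction c generalizing m with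
  | nil => simp at h1
  | cons a c ih =>
    cases m with
    | zero =>
      simp only [List.drop_zero, List.head?_cons, Option.some.injEq] at h1
      subst h1; simp
    | succ m =>
      have ha : a ≠ '@' := by
        have := h2 0 (Nat.succ_pos m); simpa using this
      simp only [List.take_succ_cons, List.takeWhile_cons]
      rw [ih m h1 (fun i hi => by
        have := h2 (i + 1) (Nat.succ_lt_succ hi); simpa using this)]
      simp [ha]

-- s ++ ['@'] is a prefix of c iff '@' occurs in c and the part before the first '@' is s
theorem fcr_tw (s c : List Char) (hs : '@' ∉ s) :
    (s ++ ['@'] <+: c) ↔ ('@' ∈ c ∧ c.takeWhile (fun a => !(a == '@')) = s) := by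
  induction c generalizing s with
  | nil =>
    simp only [List.prefix_nil, List.not_mem_nil, false_and, iff_false]
    intro h; simpa using congrArg List.length h
  | cons a c ih =>
    cases s with
    | nil =>
      simp only [List.nil_append, List.mem_cons, List.takeWhile_cons]
      rw [fcr_singleton_prefix]
      by_cases ha : a = '@'
      · subst ha; simp
      · simp [ha, Ne.symm ha]
    | cons b s' =>
      have hb : b ≠ '@' := fun h => hs (h ▸ List.mem_cons_self)
      have hs' : '@' ∉ s' := fun h => hs (List.mem_cons_of_mem _ h)
      simp only [List.cons_append, List.cons_prefix_cons, List.mem_cons, List.takeWhile_cons]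
      by_cases hab : a = b
      · subst hab
        simp only [true_and, Ne.symm hb, false_or]
        rw [if_pos (by simpa using hb)]
        simp only [List.cons.injEq, true_and]
        exact (ih s' hs').trans (by tauto)
      · constructor
        · rintro ⟨rfl, -⟩; exact absurd rfl hab
        · rintro ⟨-, heq⟩
          by_cases ha : a = '@'
          · rw [if_neg (by simp [ha])] at heq
            exact absurd heq (by simp)
          · rw [if_pos (by simpa using ha)] at heq
            exact absurd (List.cons.injEq .. ▸ heq).1 hab

-- under '@' ∈ k, the before-'@' slice is takeWhile (≠ '@')
theorem fcr_prefix_eq (k : String) (h : '@' ∈ k.toList) :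
    (fcrPrefix k).toList = k.toList.takeWhile (fun a => !(a == '@')) := by
  have hat : ("@" : String).toList = ['@'] := rfl
  have hnn : 0 ≤ PySem.Chars.find k.toList ['@'] :=
    (PySem.Chars.find_nonneg_iff _ _).mpr (fcr_singleton_infix.mpr h)
  obtain ⟨h1, h2⟩ := PySem.Chars.find_spec hnn
  unfold fcrPrefix
  rw [PySem.Str.toList_slice, PySem.Chars.slice_eq_listSlice, PySem.Str.find_eq, hat,
    PySem.List.slice_to _ hnn]
  exact fcr_take_eq_takeWhile _ _ (fcr_singleton_prefix.mp h1)
    (fun i hi hhd => h2 i hi (fcr_singleton_prefix.mpr hhd))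

-- core: k.startswith(short + "@")  ⟺  '@' in k and k's before-'@' prefix is short
theorem fcr_key (k s : String) (hs : '@' ∉ s.toList) :
    PySem.Str.startswith k (s ++ "@") = true ↔
      ('@' ∈ k.toList ∧ fcrPrefix k = s) := by
  have hat : ("@" : String).toList = ['@'] := rfl
  simp only [PySem.Str.startswith_eq, String.toList_append, hat,
    PySem.Chars.startswith_iff, ← String.toList_inj]
  constructor
  · intro hpfx
    have hm : '@' ∈ k.toList := hpfx.sublist.subset (by simp)
    refine ⟨hm, ?_⟩
    rw [fcr_prefix_eq k hm]
    exact ((fcr_tw s.toList k.toList hs).mp hpfx).2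
  · rintro ⟨hm, heq⟩
    rw [fcr_prefix_eq k hm] at heq
    exact (fcr_tw s.toList k.toList hs).mpr ⟨hm, heq⟩

-- membership in B's fold-built inverted index
theorem fcr_addKey_mem (cov : PySem.Set String) (a x : String) :
    x ∈ fcrAddKey cov a ↔
      x ∈ cov ∨ (x = a ∨ (PySem.Str.find a "@" ≠ -1 ∧ x = fcrPrefix a ++ fvSuffix)) := by
  unfold fcrAddKey
  by_cases hf : PySem.Str.find a "@" = -1
  · rw [if_neg (by simp only [bne_iff_ne, ne_eq, not_not]; exact hf), PySem.Set.mem_add]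
    constructor
    · rintro (h | rfl)
      · exact Or.inl h
      · exact Or.inr (Or.inl rfl)
    · rintro (h | rfl | ⟨hne, -⟩)
      · exact Or.inl h
      · exact Or.inr rfl
      · exact absurd hf hne
  · rw [if_pos (by simp only [bne_iff_ne, ne_eq]; exact hf), PySem.Set.mem_add, PySem.Set.mem_add]
    constructor
    · rintro ((h | rfl) | rfl)
      · exact Or.inl h
      · exact Or.inr (Or.inl rfl)
      · exact Or.inr (Or.inr ⟨hf, rfl⟩)
    · rintro (h | rfl | ⟨-, rfl⟩)
      · exact Or.inl (Or.inl h)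
      · exact Or.inl (Or.inr rfl)
      · exact Or.inr rfl

theorem fcr_mem_foldl (ck : List String) (cov : PySem.Set String) (x : String) :
    x ∈ ck.foldl fcrAddKey cov ↔
      x ∈ cov ∨ ∃ k ∈ ck,
        x = k ∨ (PySem.Str.find k "@" ≠ -1 ∧ x = fcrPrefix k ++ fvSuffix) := by
  induction ck generalizing cov with
  | nil => simp
  | cons a ck ih =>
    rw [List.foldl_cons, ih, fcr_addKey_mem]
    constructor
    · rintro ((h | h) | ⟨k, hk, h⟩)
      · exact Or.inl h
      · exact Or.inr ⟨a, List.mem_cons_self, h⟩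
      · exact Or.inr ⟨k, List.mem_cons_of_mem _ hk, h⟩
    · rintro (h | ⟨k, hk, h⟩)
      · exact Or.inl (Or.inl h)
      · rcases List.mem_cons.mp hk with rfl | hk
        · exact Or.inl (Or.inr h)
        · exact Or.inr ⟨k, hk, h⟩

theorem fcr_covered_iff (ck : List String) (x : String) :
    x ∈ fcrCovered ck ↔
      x ∈ ck ∨ ∃ k ∈ ck,
        PySem.Str.find k "@" ≠ -1 ∧ x = fcrPrefix k ++ fvSuffix := by
  unfold fcrCovered
  rw [fcr_mem_foldl]
  constructor
  · rintro (h | ⟨k, hk, (rfl | h)⟩)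
    · exact absurd h (by simp [PySem.Set.empty])
    · exact Or.inl hk
    · exact Or.inr ⟨k, hk, h⟩
  · rintro (h | ⟨k, hk, h⟩)
    · exact Or.inr ⟨x, h, Or.inl rfl⟩
    · exact Or.inr ⟨k, hk, Or.inr h⟩

-- rows whose hint has no annotation: the synthesized entries all contain '@', so membership in the
-- inverted index is plain membership in crm_keys
theorem fcr_row_nonFV (ck : List String) (r : String × String × String)
    (h1 : PySem.Str.isIn "FormattedValue" r.2.1 = false)
    (h2 : '@' ∉ r.2.1.toList) :
    fcrRowA ck r = fcrRowB (fcrCovered ck) r := by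
  have h1' : PySem.Chars.isIn
      ['F','o','r','m','a','t','t','e','d','V','a','l','u','e'] r.2.1.toList = false := by
    simpa using h1
  have hmem : r.2.1 ∈ fcrCovered ck ↔ r.2.1 ∈ ck := by
    rw [fcr_covered_iff]
    constructor
    · rintro (h | ⟨k, -, -, heq⟩)
      · exact h
      · exfalso; apply h2
        rw [heq, String.toList_append]
        exact List.mem_append_right _ (by decide)
    · exact Or.inl
  simp [fcrRowA, fcrRowB, h1', hmem]

-- FormattedValue rows: hint = short ++ fvSuffix; the synthesized entry for a key k equals the hint
-- iff k starts with short ++ "@" (fcr_key), matching A's any() fallback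
theorem fcr_row_FV (ck : List String) (r : String × String × String)
    (h1 : PySem.Str.isIn "FormattedValue" r.2.1 = true)
    (h2 : r.2.1 = fcrShort r.2.1 ++ fvSuffix)
    (h3 : '@' ∉ (fcrShort r.2.1).toList) :
    fcrRowA ck r = fcrRowB (fcrCovered ck) r := by
  have hcov : r.2.1 ∈ fcrCovered ck ↔
      (r.2.1 ∈ ck ∨ ∃ k ∈ ck,
        PySem.Str.startswith k (fcrShort r.2.1 ++ "@") = true) := by
    rw [fcr_covered_iff]
    constructor
    · rintro (h | ⟨k, hk, hne, heq⟩)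
      · exact Or.inl h
      · have hmemk : '@' ∈ k.toList := by
          have hne' : PySem.Chars.find k.toList ['@'] ≠ -1 := by simpa using hne
          exact fcr_singleton_infix.mp ((PySem.Chars.find_ne_neg_one_iff _ _).mp hne')
        have hpre : fcrPrefix k = fcrShort r.2.1 := by
          have h' := congrArg String.toList (h2 ▸ heq)
          simp only [String.toList_append] at h'
          exact String.toList_inj.mp (List.append_cancel_right h'.symm)
        exact Or.inr ⟨k, hk, (fcr_key k _ h3).mpr ⟨hmemk, hpre⟩⟩
    · rintro (h | ⟨k, hk, hsw⟩)
      · exact Or.inl h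
      · obtain ⟨hmemk, hpre⟩ := (fcr_key k _ h3).mp hsw
        refine Or.inr ⟨k, hk, ?_, ?_⟩
        · have : PySem.Chars.find k.toList ['@'] ≠ -1 :=
            (PySem.Chars.find_ne_neg_one_iff _ _).mpr (fcr_singleton_infix.mpr hmemk)
          simpa using this
        · rw [hpre, ← h2]
  have h1' : PySem.Chars.isIn
      ['F','o','r','m','a','t','t','e','d','V','a','l','u','e'] r.2.1.toList = true := by
    simpa using h1
  by_cases hp : r.2.1 ∈ ck
  · simp [fcrRowA, fcrRowB, hcov, hp]
  · simp [fcrRowA, fcrRowB, hcov, hp, h1']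

theorem fcr_foldl_map (ck : List String) :
    fcrTable.foldl (fun rows r => rows ++ [fcrRowA ck r]) []
      = fcrTable.map (fcrRowA ck) := by
  rw [PySem.List.foldl_append_singleton_eq_map, List.nil_append]

-- ===== VERDICT (by name: the statement is the Claim_ definition above) =====
theorem field_coverage_report_spec : Claim_equal_field_coverage_report := by
  intro ck _
  unfold Spec_field_coverage_report field_coverage_report field_coverage_report_alt
  rw [fcr_foldl_map]
  refine List.map_congr_left ?_
  intro r hr
  fin_cases hr <;>
    first
      | exact fcr_row_nonFV ck _ (by decide) (by decide)
      | exact fcr_row_FV ck _ (by decide) (by decide) (by decide)
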